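-- pv_equiv track=rewrite | github.com/bianpeng001/GodotPy | Demo/game/num_ch.py | num_to_chinese
-- ===== SOURCE A (Python) =====
-- _ch_num = ['〇','一','二','三','四','五','六','七','八','九',]
--
-- def num_to_chinese(num):
--     if num == 0:
--         return _ch_num[0]
--
--     minus = num < 0
--     if minus:
--         num = -num
--
--     s = []
--     while num > 0:
--         d = num % 10
--         s.append(_ch_num[d])
--         num //= 10
--
--     if minus:
--         s.append('负')
--     s.reverse()
--
--     return ''.join(s)
-- ===== SOURCE B (Python) =====
-- _ch_num = ['〇','一','二','三','四','五','六','七','八','九',]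
--
-- def num_to_chinese(num):
--     body = ''.join(_ch_num[ord(c) - 48] for c in str(abs(num)))
--     return '负' + body if num < 0 else body
-- ===== Notes on version B (the rewrite author's own statement) =====
-- stated objective: simpler
-- what changed: Replaces the modulo/floor-division digit-extraction loop with append and final reverse by a single forward map over the characters of str(abs(num)), indexing each digit character into the table; the sign mark is prepended instead of appended-then-reversed.
import Mathlib
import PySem

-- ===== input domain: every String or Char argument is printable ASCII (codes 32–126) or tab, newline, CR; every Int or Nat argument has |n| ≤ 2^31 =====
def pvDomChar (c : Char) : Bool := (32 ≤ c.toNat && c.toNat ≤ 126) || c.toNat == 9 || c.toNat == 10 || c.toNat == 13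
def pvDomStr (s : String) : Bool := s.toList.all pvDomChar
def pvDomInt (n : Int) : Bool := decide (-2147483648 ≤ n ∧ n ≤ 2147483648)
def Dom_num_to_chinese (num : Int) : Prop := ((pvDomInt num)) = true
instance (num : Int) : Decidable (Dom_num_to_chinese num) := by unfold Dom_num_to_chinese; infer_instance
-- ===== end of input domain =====

-- B replaces A's modulo/floor-division extraction loop (append + final reverse) by one forward map
-- over the characters of str(abs(num)); same values, simpler decomposition, no speed claim.

-- ===== PORT A =====
def pvChNum : List String := ["〇","一","二","三","四","五","六","七","八","九"]

-- the 'while num > 0' loop of A; list index _ch_num[d] via pyGet? (.getD "" is the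
-- unreachable IndexError case: d = num % 10 ∈ [0,10) here)
def pvLoopA (num : Int) (s : List String) : List String :=
  if 0 < num then
    pvLoopA (PySem.Int.floordiv num 10)
      (s ++ [(PySem.List.pyGet? pvChNum (PySem.Int.mod num 10)).getD ""])
  else s
termination_by num.toNat
decreasing_by
  simp only [PySem.Int.floordiv]
  have h : num.fdiv 10 = num / 10 := by rw [Int.fdiv_eq_ediv]; simp
  omega

def num_to_chinese (num : Int) : String :=
  if num = 0 then (PySem.List.pyGet? pvChNum 0).getD ""
  else
    let minus : Bool := decide (num < 0)
    let n : Int := if minus then -num else num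
    let s := pvLoopA n []
    let s := if minus then s ++ ["负"] else s
    PySem.Str.join "" s.reverse

-- ===== PORT B =====
-- _ch_num[ord(c) - 48] (pyGet?; .getD "" is the unreachable IndexError case: c is a decimal digit)
def pvDigitCh (c : Char) : String :=
  (PySem.List.pyGet? pvChNum ((c.toNat : Int) - 48)).getD ""

def num_to_chinese_alt (num : Int) : String :=
  let body := PySem.Str.join "" ((PySem.Int.toStr (num.natAbs : Int)).toList.map pvDigitCh)
  if num < 0 then "负" ++ body else body

-- ===== PRECONDITION & SPEC =====
def Spec_num_to_chinese (num : Int) (out : String) : Prop := out = num_to_chinese_alt num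
instance (num : Int) (out : String) : Decidable (Spec_num_to_chinese num out) := by unfold Spec_num_to_chinese; infer_instance

-- ===== CLAIM (what is proved, stated in full; the proofs are below) =====
def Claim_equal_num_to_chinese : Prop := ∀ (num : Int), Dom_num_to_chinese num → Spec_num_to_chinese num (num_to_chinese num)

-- ===== LEMMAS AND PROOFS =====

-- the Chinese string for one decimal digit d
def pvChD (d : Nat) : String := (PySem.List.pyGet? pvChNum (d : Int)).getD ""

theorem pvDigitCh_digitChar {d : Nat} (h : d < 10) :
    pvDigitCh (Nat.digitChar d) = pvChD d := by
  interval_cases d <;> decide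

theorem pvLoopA_natCast (n : Nat) (s : List String) (h : 0 < n) :
    pvLoopA (n : Int) s = s ++ (((Nat.toDigits 10 n).map pvDigitCh).reverse) := by
  induction n using Nat.strong_induction_on generalizing s with
  | _ n ih =>
    rw [pvLoopA.eq_def]
    have hpos : (0 : Int) < (n : Int) := by exact_mod_cast h
    rw [if_pos hpos]
    have hmod : PySem.Int.mod (n : Int) 10 = ((n % 10 : Nat) : Int) := by
      simp only [PySem.Int.mod]
      rw [Int.fmod_eq_emod]
      simp
    have hdiv : PySem.Int.floordiv (n : Int) 10 = ((n / 10 : Nat) : Int) := by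
      simp only [PySem.Int.floordiv]
      rw [Int.fdiv_eq_ediv]
      simp
    have hd : (PySem.List.pyGet? pvChNum (PySem.Int.mod (n : Int) 10)).getD ""
        = pvChD (n % 10) := by rw [hmod]; rfl
    rw [hd, hdiv]
    by_cases hlt : n < 10
    · have hdiv0 : n / 10 = 0 := Nat.div_eq_of_lt hlt
      have : Nat.toDigits 10 n = [Nat.digitChar n] := Nat.toDigits_of_lt_base hlt
      rw [hdiv0, this]
      have hmn : n % 10 = n := Nat.mod_eq_of_lt hlt
      rw [pvLoopA.eq_def, if_neg (by omega : ¬ (0:Int) < ((0:Nat):Int))]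
      simp [pvDigitCh_digitChar hlt, hmn]
    · have hge : 10 ≤ n := by omega
      have hrec := Nat.toDigits_of_base_le (b := 10) (n := n) (by norm_num) hge
      have hdivpos : 0 < n / 10 := Nat.div_pos hge (by norm_num)
      rw [ih (n / 10) (Nat.div_lt_self h (by norm_num)) _ hdivpos, hrec]
      have hm : pvDigitCh (Nat.digitChar (n % 10)) = pvChD (n % 10) :=
        pvDigitCh_digitChar (Nat.mod_lt _ (by norm_num))
      simp [hm, List.append_assoc]

theorem pvToChars_natAbs (num : Int) :
    (PySem.Int.toStr ((num.natAbs : Nat) : Int)).toList = Nat.toDigits 10 num.natAbs := by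
  rw [PySem.Int.toList_toStr]
  unfold PySem.Int.toChars
  rw [if_neg (by omega), Int.toNat_natCast]

theorem pvJoinNil_toList (L : List String) :
    (PySem.Str.join "" L).toList = (L.map String.toList).flatten := by
  rw [PySem.Str.toList_join]
  have : ("" : String).toList = [] := rfl
  rw [this]
  induction L with
  | nil => rfl
  | cons x xs ih =>
    cases xs with
    | nil => simp [PySem.Chars.join, List.intercalate]
    | cons y ys =>
      simp only [List.map_cons, List.flatten_cons] at *
      rw [PySem.Chars.join_cons_cons] at *
      simpa using ih

theorem pvStr_eq_of_toList {s t : String} (h : s.toList = t.toList) : s = t := by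
  have := congrArg String.ofList h
  simpa using this

theorem num_to_chinese_eq (num : Int) : num_to_chinese num = num_to_chinese_alt num := by
  by_cases h0 : num = 0
  · subst h0; decide
  · unfold num_to_chinese num_to_chinese_alt
    rw [if_neg h0]
    have habs : ((num.natAbs : Nat) : Int) = if decide (num < 0) = true then -num else num := by
      by_cases hn : num < 0 <;> simp [hn] <;> omega
    have hpos : 0 < num.natAbs := by omega
    have hloop := pvLoopA_natCast num.natAbs [] hpos
    by_cases hn : num < 0
    · simp only [hn, decide_true, if_true] at habs ⊢
      rw [← habs, hloop]
      apply pvStr_eq_of_toList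
      rw [List.nil_append, List.reverse_append, List.reverse_reverse]
      rw [pvJoinNil_toList, pvToChars_natAbs]
      have : (("负" : String) ++ PySem.Str.join "" ((Nat.toDigits 10 num.natAbs).map pvDigitCh)).toList
          = ("负" : String).toList ++ (PySem.Str.join "" ((Nat.toDigits 10 num.natAbs).map pvDigitCh)).toList := by
        rw [String.toList_append]
      rw [this, pvJoinNil_toList]
      simp [List.map_map]
    · simp only [hn, decide_false, if_false] at habs ⊢
      rw [← habs, hloop]
      apply pvStr_eq_of_toList
      rw [List.nil_append, if_neg (by simp : ¬ (false = true)), List.reverse_reverse]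
      rw [pvJoinNil_toList, pvJoinNil_toList, pvToChars_natAbs]

-- ===== VERDICT (by name: the statement is the Claim_ definition above) =====
theorem num_to_chinese_spec : Claim_equal_num_to_chinese := by
  intro num _
  unfold Spec_num_to_chinese
  exact num_to_chinese_eq num
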